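-- pv_equiv track=rewrite | github.com/Przemek625/reddit_chalenges | latin_string.py | make_cols
-- ===== SOURCE A (Python) =====
-- def make_cols(numbers, dimension):
--     cols = [
--         [] for _ in range(dimension)
--     ]
--
--     for i in range(dimension):
--         for i2 in range(i, i + dimension * (dimension - 1) + 1, dimension):
--             cols[i].append(numbers[i2])
--     return cols
-- ===== SOURCE B (Python) =====
-- def make_cols(numbers, dimension):
--     rows = [numbers[k * dimension:(k + 1) * dimension] for k in range(dimension)]
--     return [list(col) for col in zip(*rows)]
-- ===== Notes on version B (the rewrite author's own statement) =====
-- stated objective: alternative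
-- what changed: Replaces the nested column-major gather with in-place appends by slicing the flat list into rows and transposing them with zip(*rows); no mutation, no index arithmetic inside a loop body.
import Mathlib
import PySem

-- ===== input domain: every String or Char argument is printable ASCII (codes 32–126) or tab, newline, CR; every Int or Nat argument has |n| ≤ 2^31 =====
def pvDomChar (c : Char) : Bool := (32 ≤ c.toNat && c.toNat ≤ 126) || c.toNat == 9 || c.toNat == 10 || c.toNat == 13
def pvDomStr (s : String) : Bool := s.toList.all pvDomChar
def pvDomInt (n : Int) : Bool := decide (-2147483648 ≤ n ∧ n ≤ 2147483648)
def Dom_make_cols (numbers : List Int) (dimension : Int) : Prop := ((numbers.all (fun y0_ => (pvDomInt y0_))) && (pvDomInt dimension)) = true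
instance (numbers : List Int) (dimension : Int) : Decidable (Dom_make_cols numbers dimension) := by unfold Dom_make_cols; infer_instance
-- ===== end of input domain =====

-- B replaces A's nested gather with mutable appends by slicing the flat list into rows and transposing them (zip(*rows)); equal to A on Pre_ (A raises IndexError when 0 < dimension and there are fewer than dimension*dimension numbers; Pre_ excludes exactly those inputs).


-- ===== PORT A =====
def make_cols (numbers : List Int) (dimension : Int) : List (List Int) :=
  let cols : List (List Int) := (PySem.List.pyRange 0 dimension 1).map (fun _ => [])
  (PySem.List.pyRange 0 dimension 1).foldl (fun cols i =>
    (PySem.List.pyRange i (i + dimension * (dimension - 1) + 1) dimension).foldl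
      (fun cols i2 =>
        PySem.List.pySetD cols i
          (PySem.List.pyGetD cols i [] ++ [PySem.List.pyGetD numbers i2 0]))
      cols) cols

-- ===== PORT B =====
-- zip(*rows): truncate to the shortest row and read entry i of every row (Python's zip builtin)
def pyZipStar (rows : List (List Int)) : List (List Int) :=
  match rows with
  | [] => []
  | r :: rest =>
    (List.range (rest.foldl (fun m t => min m t.length) r.length)).map
      (fun i => (r :: rest).map (fun t => t.getD i 0))

def make_cols_alt (numbers : List Int) (dimension : Int) : List (List Int) :=
  let rows : List (List Int) := (PySem.List.pyRange 0 dimension 1).map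
    (fun k => PySem.List.slice numbers (some (k * dimension)) (some ((k + 1) * dimension)))
  (pyZipStar rows).map (fun col => col)

-- ===== PRECONDITION & SPEC =====
-- Pre_ excludes exactly the inputs where A raises IndexError: dimension ≥ 1 with fewer than dimension² numbers.
def Pre_make_cols (numbers : List Int) (dimension : Int) : Prop :=
  dimension ≤ 0 ∨ dimension * dimension ≤ (numbers.length : Int)
instance (numbers : List Int) (dimension : Int) : Decidable (Pre_make_cols numbers dimension) := by unfold Pre_make_cols; infer_instance
def pvWitness_make_cols : List Int × Int := ([1, 2, 3, 4], 2)

def Spec_make_cols (numbers : List Int) (dimension : Int) (out : List (List Int)) : Prop := out = make_cols_alt numbers dimension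
instance (numbers : List Int) (dimension : Int) (out : List (List Int)) : Decidable (Spec_make_cols numbers dimension out) := by unfold Spec_make_cols; infer_instance

-- ===== CLAIM (what is proved, stated in full; the proofs are below) =====
def Claim_equal_make_cols : Prop := ∀ (numbers : List Int) (dimension : Int), Dom_make_cols numbers dimension → Pre_make_cols numbers dimension → Spec_make_cols numbers dimension (make_cols numbers dimension)
-- ===== LEMMAS AND PROOFS =====

-- append v to the column at index j (A's loop body, after resolving the Int index)
def appAt (cs : List (List Int)) (j : Nat) (v : Int) : List (List Int) :=
  cs.set j (cs.getD j [] ++ [v])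

theorem length_appAt (cs : List (List Int)) (j : Nat) (v : Int) :
    (appAt cs j v).length = cs.length := by
  simp [appAt]

theorem getD_appAt (cs : List (List Int)) (j k : Nat) (v : Int) (hj : j < cs.length) :
    (appAt cs j v).getD k [] = if k = j then cs.getD j [] ++ [v] else cs.getD k [] := by
  unfold appAt
  rcases eq_or_ne k j with h | h
  · subst h
    simp [List.getD, List.getElem?_set_self hj]
  · simp [List.getD, List.getElem?_set_ne (Ne.symm h), h]

theorem length_foldl_appAt {α : Type} (is : List α) (f : α → Nat) (g : α → Int)
    (cs : List (List Int)) :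
    (is.foldl (fun cs i => appAt cs (f i) (g i)) cs).length = cs.length := by
  induction is generalizing cs with
  | nil => rfl
  | cons i is ih => simp [List.foldl_cons, ih, length_appAt]

-- the scatter characterisation: column k of a fold of appAt steps
theorem getD_foldl_appAt {α : Type} (is : List α) (f : α → Nat) (g : α → Int)
    (cs : List (List Int)) (k : Nat)
    (hf : ∀ i ∈ is, f i < cs.length) :
    (is.foldl (fun cs i => appAt cs (f i) (g i)) cs).getD k []
      = cs.getD k [] ++ (is.filter (fun i => f i == k)).map g := by
  induction is generalizing cs with
  | nil => simp
  | cons i is ih =>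
    have hi : f i < cs.length := hf i (by simp)
    rw [List.foldl_cons, ih _ (fun j hj => by rw [length_appAt]; exact hf j (by simp [hj])),
      getD_appAt cs (f i) k (g i) hi]
    rcases eq_or_ne (f i) k with h | h
    · simp [h]
    · simp [h, Ne.symm h]

-- two lists of lists with equal length and equal getD at every index are equal
theorem eq_of_getD_eq (xs ys : List (List Int)) (hlen : xs.length = ys.length)
    (h : ∀ k, xs.getD k [] = ys.getD k []) : xs = ys := by
  apply List.ext_getElem hlen
  intro k h1 h2
  have := h k
  rwa [List.getD_eq_getElem _ _ h1, List.getD_eq_getElem _ _ h2] at this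

-- A's fold, rewritten as a fold of appAt steps over the flattened (i, i2) pairs
theorem a_foldl_appAt (numbers : List Int) (d : Int)
    (cs : List (List Int)) (hlen : (cs.length : Int) = d) (is : List Int)
    (hmem : ∀ i ∈ is, 0 ≤ i ∧ i < d) :
    is.foldl (fun cols i =>
      (PySem.List.pyRange i (i + d * (d - 1) + 1) d).foldl
        (fun cols i2 =>
          PySem.List.pySetD cols i
            (PySem.List.pyGetD cols i [] ++ [PySem.List.pyGetD numbers i2 0])) cols) cs
    = (is.flatMap (fun i => (PySem.List.pyRange i (i + d * (d - 1) + 1) d).map (fun i2 => (i, i2)))).foldl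
        (fun cols p => appAt cols p.1.toNat (PySem.List.pyGetD numbers p.2 0)) cs := by
  induction is generalizing cs with
  | nil => rfl
  | cons i is ih =>
    obtain ⟨hi0, hid⟩ := hmem i (by simp)
    rw [List.foldl_cons, List.flatMap_cons, List.foldl_append]
    have hinner : ∀ (ys : List Int) (cs : List (List Int)), (cs.length : Int) = d →
        ys.foldl (fun cols i2 =>
          PySem.List.pySetD cols i
            (PySem.List.pyGetD cols i [] ++ [PySem.List.pyGetD numbers i2 0])) cs
        = (ys.map (fun i2 => (i, i2))).foldl
            (fun cols p => appAt cols p.1.toNat (PySem.List.pyGetD numbers p.2 0)) cs := by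
      intro ys
      induction ys with
      | nil => intro cs _; rfl
      | cons y ys ihy =>
        intro cs hcs
        rw [List.foldl_cons, List.map_cons, List.foldl_cons]
        have h1 : i < (cs.length : Int) := by rw [hcs]; exact hid
        have hstep : PySem.List.pySetD cs i
            (PySem.List.pyGetD cs i [] ++ [PySem.List.pyGetD numbers y 0])
            = appAt cs i.toNat (PySem.List.pyGetD numbers y 0) := by
          rw [PySem.List.pySetD_of_nonneg _ _ hi0,
            PySem.List.pyGetD_eq_getElem _ _ hi0 h1, appAt,
            List.getD_eq_getElem _ _ (by omega : i.toNat < cs.length)]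
        rw [hstep, ihy _ (by rw [length_appAt]; exact hcs)]
    rw [hinner _ cs hlen]
    have hlen2 : ((((PySem.List.pyRange i (i + d * (d - 1) + 1) d).map (fun i2 => (i, i2))).foldl
        (fun cols p => appAt cols p.1.toNat (PySem.List.pyGetD numbers p.2 0)) cs).length : Int) = d := by
      rw [length_foldl_appAt]; exact hlen
    exact ih _ hlen2 (fun j hj => hmem j (by simp [hj]))

-- A's inner stepped range in closed form: j, j+d, …, j+d(d-1)
theorem inner_range_eq (d : Int) (hd : 0 < d) (i : Int) :
    PySem.List.pyRange i (i + d * (d - 1) + 1) d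
      = (List.range d.toNat).map (fun k : Nat => i + d * (k : Int)) := by
  rw [PySem.List.pyRange_of_pos _ _ hd, if_pos (by nlinarith : i < i + d * (d - 1) + 1)]
  have h : i + d * (d - 1) + 1 - i + d - 1 = d * d := by ring
  rw [h, Int.mul_ediv_cancel_left _ (by omega : d ≠ 0)]

-- A's pair stream restricted to first component j: exactly the inner range of column j
theorem filter_pairs_fst (d : Int) (j : Nat) (hj : (j : Int) < d) :
    ((PySem.List.pyRange 0 d 1).flatMap
        (fun i => (PySem.List.pyRange i (i + d * (d - 1) + 1) d).map (fun i2 => (i, i2)))).filter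
      (fun p => p.1.toNat == j)
    = (PySem.List.pyRange (j : Int) ((j : Int) + d * (d - 1) + 1) d).map (fun i2 => ((j : Int), i2)) := by
  rw [List.filter_flatMap,
    PySem.List.pyRange_one_append 0 (j : Int) d (by omega) (by omega),
    PySem.List.pyRange_one_cons (a := (j : Int)) (b := d) hj,
    List.flatMap_append, List.flatMap_cons]
  have hleft : (PySem.List.pyRange 0 (j : Int) 1).flatMap
      (fun i => ((PySem.List.pyRange i (i + d * (d - 1) + 1) d).map (fun i2 => (i, i2))).filter
        (fun p => p.1.toNat == j)) = [] := by
    rw [List.flatMap_eq_nil_iff]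
    intro i hi
    have hi' := PySem.List.mem_pyRange_one.mp hi
    rw [List.filter_map]
    have h0 : ((PySem.List.pyRange i (i + d * (d - 1) + 1) d).filter
        ((fun p : Int × Int => p.1.toNat == j) ∘ (fun i2 => (i, i2)))) = [] := by
      apply List.filter_eq_nil_iff.mpr
      intro a _
      simp only [Function.comp]
      simp
      omega
    rw [h0, List.map_nil]
  have hright : (PySem.List.pyRange ((j : Int) + 1) d 1).flatMap
      (fun i => ((PySem.List.pyRange i (i + d * (d - 1) + 1) d).map (fun i2 => (i, i2))).filter
        (fun p => p.1.toNat == j)) = [] := by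
    rw [List.flatMap_eq_nil_iff]
    intro i hi
    have hi' := PySem.List.mem_pyRange_one.mp hi
    rw [List.filter_map]
    have h0 : ((PySem.List.pyRange i (i + d * (d - 1) + 1) d).filter
        ((fun p : Int × Int => p.1.toNat == j) ∘ (fun i2 => (i, i2)))) = [] := by
      apply List.filter_eq_nil_iff.mpr
      intro a _
      simp only [Function.comp]
      simp
      omega
    rw [h0, List.map_nil]
  rw [hleft, hright, List.nil_append, List.append_nil]
  apply List.filter_eq_self.mpr
  intro p hp
  obtain ⟨i2, _, hpe⟩ := List.mem_map.mp hp
  subst hpe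
  simp

-- the canonical grid both ports compute: column i, entry j is numbers[i + d*j]
def grid (numbers : List Int) (dn : Nat) : List (List Int) :=
  (List.range dn).map (fun i => (List.range dn).map (fun j => numbers.getD (i + dn * j) 0))

-- A equals the grid (positive dimension, enough numbers)
theorem a_eq_grid (numbers : List Int) (d : Int) (hd : 0 < d)
    (hlen : d * d ≤ (numbers.length : Int)) :
    make_cols numbers d = grid numbers d.toNat := by
  unfold make_cols
  simp only []
  set cs : List (List Int) := (PySem.List.pyRange 0 d 1).map (fun _ => ([] : List Int)) with hcs
  have hcslen : (cs.length : Int) = d := by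
    rw [hcs, List.length_map, PySem.List.length_pyRange_one]; omega
  have hcsD : ∀ k : Nat, cs.getD k [] = [] := by
    intro k
    rw [hcs]
    simp only [List.getD, List.getElem?_map]
    cases (PySem.List.pyRange 0 d 1)[k]? <;> rfl
  rw [a_foldl_appAt numbers d cs hcslen _
      (fun i hi => by have := PySem.List.mem_pyRange_one.mp hi; omega)]
  have hpairsmem : ∀ p ∈ (PySem.List.pyRange 0 d 1).flatMap
      (fun i => (PySem.List.pyRange i (i + d * (d - 1) + 1) d).map (fun i2 => (i, i2))),
      p.1.toNat < cs.length := by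
    intro p hp
    rcases List.mem_flatMap.mp hp with ⟨i, hi, hpi⟩
    rcases List.mem_map.mp hpi with ⟨i2, _, hpe⟩
    have hi' := PySem.List.mem_pyRange_one.mp hi
    subst hpe
    simp only []
    omega
  apply eq_of_getD_eq
  · rw [length_foldl_appAt, grid]
    simp only [List.length_map, List.length_range]
    omega
  · intro k
    rw [getD_foldl_appAt _ _ _ _ _ hpairsmem, hcsD, List.nil_append]
    rcases Nat.lt_or_ge k cs.length with hk | hk
    · have hkd : (k : Int) < d := by omega
      rw [filter_pairs_fst d k hkd, List.map_map, inner_range_eq d hd (k : Int), List.map_map]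
      have hg : (grid numbers d.toNat).getD k []
          = (List.range d.toNat).map (fun j => numbers.getD (k + d.toNat * j) 0) := by
        rw [grid, List.getD, List.getElem?_map,
          List.getElem?_range (by omega : k < d.toNat)]
        rfl
      rw [hg]
      apply List.map_congr_left
      intro j hj
      have hj' : j < d.toNat := List.mem_range.mp hj
      have hidx0 : (0 : Int) ≤ (k : Int) + d * (j : Int) := by positivity
      have hidx1 : (k : Int) + d * (j : Int) < (numbers.length : Int) := by
        nlinarith [mul_le_mul_of_nonneg_left (show (j : Int) ≤ d - 1 by omega) hd.le]
      simp only [Function.comp]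
      rw [PySem.List.pyGetD_eq_getElem _ _ hidx0 hidx1]
      have hcast : ((k + d.toNat * j : Nat) : Int) = (k : Int) + d * (j : Int) := by
        push_cast
        rw [Int.toNat_of_nonneg hd.le]
      have hlt : k + d.toNat * j < numbers.length := by omega
      rw [List.getD_eq_getElem _ _ hlt]
      congr 1
      rw [← hcast, Int.toNat_natCast]
    · have hA : (((PySem.List.pyRange 0 d 1).flatMap
          (fun i => (PySem.List.pyRange i (i + d * (d - 1) + 1) d).map (fun i2 => (i, i2)))).filter
            (fun p => p.1.toNat == k)) = [] := by
        apply List.filter_eq_nil_iff.mpr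
        intro p hp
        have := hpairsmem p hp
        simp
        omega
      have hg : (grid numbers d.toNat).getD k [] = [] := by
        rw [grid, List.getD, List.getElem?_map, List.getElem?_eq_none]
        · rfl
        · rw [List.length_range]; omega
      rw [hA, hg]
      rfl

-- Python's zip(*rows) on a nonempty rectangular list is the transpose
theorem foldl_min_const (n : Nat) (l : List Nat) (h : ∀ x ∈ l, x = n) :
    l.foldl (fun m t => min m t) n = n := by
  induction l with
  | nil => rfl
  | cons x xs ih =>
    have hx : x = n := h x (by simp)
    rw [List.foldl_cons, hx, min_self]
    exact ih (fun y hy => h y (by simp [hy]))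

theorem pyZipStar_eq (n : Nat) (rows : List (List Int)) (hne : rows ≠ [])
    (h : ∀ r ∈ rows, r.length = n) :
    pyZipStar rows = (List.range n).map (fun i => rows.map (fun r => r.getD i 0)) := by
  rcases rows with _ | ⟨r, rest⟩
  · exact absurd rfl hne
  · have hred : pyZipStar (r :: rest)
        = (List.range (rest.foldl (fun m t => min m t.length) r.length)).map
            (fun i => (r :: rest).map (fun t => t.getD i 0)) := rfl
    rw [hred]
    have hr : r.length = n := h r (by simp)
    have hmin : rest.foldl (fun m t => min m t.length) r.length = n := by
      rw [hr]
      have : rest.foldl (fun m t => min m t.length) n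
          = (rest.map List.length).foldl (fun m t => min m t) n := by
        rw [List.foldl_map]
      rw [this]
      exact foldl_min_const n _ (fun x hx => by
        rcases List.mem_map.mp hx with ⟨t, ht, hte⟩
        rw [← hte]; exact h t (by simp [ht]))
    rw [hmin]

-- B equals the grid (positive dimension, enough numbers)
theorem b_eq_grid (numbers : List Int) (d : Int) (hd : 0 < d)
    (hlen : d * d ≤ (numbers.length : Int)) :
    make_cols_alt numbers d = grid numbers d.toNat := by
  unfold make_cols_alt
  simp only []
  set rows : List (List Int) := (PySem.List.pyRange 0 d 1).map
    (fun k => PySem.List.slice numbers (some (k * d)) (some ((k + 1) * d))) with hrows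
  have hslice : ∀ k : Int, 0 ≤ k → k < d →
      PySem.List.slice numbers (some (k * d)) (some ((k + 1) * d))
        = (numbers.drop (k * d).toNat).take d.toNat := by
    intro k hk0 hkd
    have h0 : (0 : Int) ≤ k * d := mul_nonneg hk0 hd.le
    have h0' : (0 : Int) ≤ (k + 1) * d := mul_nonneg (by omega) hd.le
    have hsum : (k + 1) * d = k * d + d := by ring
    rw [PySem.List.slice_toNat (ha := h0) (hb := h0')]
    congr 1
    omega
  have hk_up : ∀ k : Int, 0 ≤ k → k < d → (k + 1) * d ≤ (numbers.length : Int) := by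
    intro k hk0 hkd
    nlinarith [mul_le_mul_of_nonneg_right (show k + 1 ≤ d by omega) hd.le]
  have hrowlen : ∀ r ∈ rows, r.length = d.toNat := by
    intro r hr
    rcases List.mem_map.mp hr with ⟨k, hk, hre⟩
    have hk' := PySem.List.mem_pyRange_one.mp hk
    subst hre
    rw [hslice k hk'.1 hk'.2, List.length_take, List.length_drop]
    have h1 := hk_up k hk'.1 hk'.2
    have hsum : (k + 1) * d = k * d + d := by ring
    have h0 : (0 : Int) ≤ k * d := mul_nonneg hk'.1 hd.le
    have h2 : k * d + d ≤ (numbers.length : Int) := by rw [← hsum]; exact h1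
    omega
  have hrne : rows ≠ [] := by
    have hrl : rows.length = d.toNat := by
      rw [hrows, List.length_map, PySem.List.length_pyRange_one]; omega
    intro hnil
    rw [hnil] at hrl
    simp at hrl
    omega
  rw [pyZipStar_eq d.toNat rows hrne hrowlen, List.map_map]
  unfold grid
  apply List.map_congr_left
  intro i hi
  have hi' : i < d.toNat := List.mem_range.mp hi
  simp only [Function.comp]
  rw [hrows, List.map_map, PySem.List.pyRange_one]
  have hz : d - 0 = d := by ring
  rw [hz, List.map_map]
  apply List.map_congr_left
  intro j hj
  have hj' : j < d.toNat := List.mem_range.mp hj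
  simp only [Function.comp]
  have hj0 : (0 : Int) ≤ 0 + (j : Int) := by positivity
  have hjd : 0 + (j : Int) < d := by omega
  rw [hslice _ hj0 hjd]
  have h1 := hk_up _ hj0 hjd
  have hsum : ((0 + (j : Int)) + 1) * d = (0 + (j : Int)) * d + d := by ring
  have htoN : ((0 + (j : Int)) * d).toNat = j * d.toNat := by
    have he : (0 + (j : Int)) * d = ((j * d.toNat : Nat) : Int) := by
      push_cast
      rw [Int.toNat_of_nonneg hd.le]
      ring
    rw [he, Int.toNat_natCast]
  have hj0d : (0 : Int) ≤ (0 + (j : Int)) * d := mul_nonneg hj0 hd.le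
  have h2 : (0 + (j : Int)) * d + d ≤ (numbers.length : Int) := by rw [← hsum]; exact h1
  have hidx : j * d.toNat + i < numbers.length := by omega
  have hcomm : d.toNat * j = j * d.toNat := Nat.mul_comm _ _
  rw [htoN]
  rw [List.getD, List.getElem?_take_of_lt hi', List.getElem?_drop]
  rw [List.getD, List.getElem?_eq_getElem (by omega : i + d.toNat * j < numbers.length),
    List.getElem?_eq_getElem (by omega : j * d.toNat + i < numbers.length)]
  simp only [Option.getD_some]
  congr 1
  omega

theorem nonpos_case (numbers : List Int) (d : Int) (hd : d ≤ 0) :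
    make_cols numbers d = make_cols_alt numbers d := by
  unfold make_cols make_cols_alt
  rw [PySem.List.pyRange_one_eq_nil hd]
  simp only [List.map_nil]
  rw [pyZipStar]
  rfl

-- ===== VERDICT (by name: the statement is the Claim_ definition above) =====
theorem make_cols_spec : Claim_equal_make_cols := by
  intro numbers dimension _ hpre
  unfold Spec_make_cols
  by_cases h : dimension ≤ 0
  · exact nonpos_case numbers dimension h
  · have hd : 0 < dimension := by omega
    rcases hpre with hp | hp
    · omega
    · rw [a_eq_grid numbers dimension hd hp, b_eq_grid numbers dimension hd hp]
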